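-- pv_equiv track=rewrite | github.com/Raptors65/slope | backend/app/services/repo_ingestion.py | should_include_tree_path
-- ===== SOURCE A (Python) =====
-- IGNORE_PATH_PREFIXES = (
--     "node_modules/",
--     ".git/",
--     "dist/",
--     "build/",
--     "__pycache__/",
--     ".venv/",
--     "vendor/",
--     ".github/",
--     "coverage/",
--     "htmlcov/",
--     ".next/",
--     "target/",
-- )
--
-- IGNORE_BASENAMES = frozenset({".DS_Store", ".gitignore"})
--
-- def should_include_tree_path(path: str) -> bool:
--     if not path or path in IGNORE_BASENAMES:
--         return False
--     base = path.rsplit("/", 1)[-1]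
--     if base in IGNORE_BASENAMES:
--         return False
--     if "__pycache__" in path.split("/"):
--         return False
--     for prefix in IGNORE_PATH_PREFIXES:
--         if path == prefix.rstrip("/") or path.startswith(prefix):
--             return False
--     return True
-- ===== SOURCE B (Python) =====
-- IGNORE_PATH_PREFIXES = (
--     "node_modules/",
--     ".git/",
--     "dist/",
--     "build/",
--     "__pycache__/",
--     ".venv/",
--     "vendor/",
--     ".github/",
--     "coverage/",
--     "htmlcov/",
--     ".next/",
--     "target/",
-- )
--
-- IGNORE_BASENAMES = frozenset({".DS_Store", ".gitignore"})
--
-- # top-level directory names to exclude, precomputed once from the prefixes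
-- IGNORE_DIRS = frozenset(p.rstrip("/") for p in IGNORE_PATH_PREFIXES)
--
-- def should_include_tree_path(path: str) -> bool:
--     if not path:
--         return False
--     segs = path.split("/")
--     if segs[-1] in IGNORE_BASENAMES:
--         return False
--     if "__pycache__" in segs:
--         return False
--     if segs[0] in IGNORE_DIRS:
--         return False
--     return True
-- ===== Notes on version B (the rewrite author's own statement) =====
-- stated objective: simpler
-- what changed: Splits the path into segments once and replaces the per-prefix rstrip/startswith scan over the 12 prefixes with a single set-membership test on the first segment (and segs[-1] for the basename, dropping the redundant whole-path basename check).
import Mathlib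
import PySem

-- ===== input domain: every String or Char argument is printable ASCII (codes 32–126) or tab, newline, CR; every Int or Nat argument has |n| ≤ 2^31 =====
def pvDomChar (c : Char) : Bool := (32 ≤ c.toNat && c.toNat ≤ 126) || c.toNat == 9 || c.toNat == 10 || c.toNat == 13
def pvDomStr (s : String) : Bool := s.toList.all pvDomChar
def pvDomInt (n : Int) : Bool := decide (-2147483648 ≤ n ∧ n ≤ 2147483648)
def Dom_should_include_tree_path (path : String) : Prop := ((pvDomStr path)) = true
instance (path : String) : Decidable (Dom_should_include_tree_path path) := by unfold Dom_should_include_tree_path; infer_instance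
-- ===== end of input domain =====

-- B splits the path into segments once and tests the first segment against a precomputed set of
-- ignored directory names instead of scanning the 12 prefixes with rstrip/startswith; objective: simpler.

-- ===== PORT A =====
def IGNORE_PATH_PREFIXES : List (List Char) :=
  ["node_modules/".toList, ".git/".toList, "dist/".toList, "build/".toList,
   "__pycache__/".toList, ".venv/".toList, "vendor/".toList, ".github/".toList,
   "coverage/".toList, "htmlcov/".toList, ".next/".toList, "target/".toList]

def IGNORE_BASENAMES : List (List Char) := [".DS_Store".toList, ".gitignore".toList]

-- hand port of s.rstrip("/"): drop trailing '/' characters; exact for this fixed chars argument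
def rstripSlash (s : List Char) : List Char := (s.reverse.dropWhile (· == '/')).reverse

-- hand port of path.rsplit("/", 1)[-1]: the part after the last '/' (the whole string if none); exact
def rsplitLast (s : List Char) : List Char := (s.reverse.takeWhile (· != '/')).reverse

def should_include_tree_path (path : String) : Bool :=
  let cs := path.toList
  if cs.isEmpty || IGNORE_BASENAMES.contains cs then false
  else
    let base := rsplitLast cs
    if IGNORE_BASENAMES.contains base then false
    else if (PySem.Chars.splitOn cs "/".toList).contains "__pycache__".toList then false
    else if IGNORE_PATH_PREFIXES.any (fun p => cs == rstripSlash p || PySem.Chars.startswith cs p)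
      then false
    else true

-- ===== PORT B =====
-- frozenset(p.rstrip("/") for p in IGNORE_PATH_PREFIXES)
def IGNORE_DIRS : List (List Char) := PySem.Set.ofList (IGNORE_PATH_PREFIXES.map rstripSlash)

def should_include_tree_path_alt (path : String) : Bool :=
  let cs := path.toList
  if cs.isEmpty then false
  else
    let segs := PySem.Chars.splitOn cs "/".toList
    -- segs[-1] / segs[0]: str.split never returns an empty list, so both indexings succeed
    match PySem.List.pyGet? segs (-1), PySem.List.pyGet? segs 0 with
    | some last, some first =>
      if IGNORE_BASENAMES.contains last then false
      else if segs.contains "__pycache__".toList then false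
      else if IGNORE_DIRS.contains first then false
      else true
    | _, _ => false

-- ===== PRECONDITION & SPEC =====
def Spec_should_include_tree_path (path : String) (out : Bool) : Prop := out = should_include_tree_path_alt path
instance (path : String) (out : Bool) : Decidable (Spec_should_include_tree_path path out) := by unfold Spec_should_include_tree_path; infer_instance

-- ===== CLAIM (what is proved, stated in full; the proofs are below) =====
def Claim_equal_should_include_tree_path : Prop := ∀ (path : String), Dom_should_include_tree_path path → Spec_should_include_tree_path path (should_include_tree_path path)

-- ===== LEMMAS AND PROOFS =====

-- reference split: split at '/' accumulating the current segment
def splitA (pre : List Char) : List Char → List (List Char)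
  | [] => [pre]
  | c :: t => if c = '/' then pre :: splitA [] t else splitA (pre ++ [c]) t

theorem splitA_ne_nil (pre : List Char) (cs : List Char) : splitA pre cs ≠ [] := by
  induction cs generalizing pre with
  | nil => simp [splitA]
  | cons c t ih => by_cases h : c = '/' <;> simp [splitA, h, ih]

theorem splitOn_go_eq (fuel : Nat) (l cur : List Char) (acc : List (List Char))
    (h : l.length ≤ fuel) :
    PySem.Chars.splitOn.go ['/'] fuel l cur acc = acc.reverse ++ splitA cur.reverse l := by
  induction fuel generalizing l cur acc with
  | zero =>
    have : l = [] := by cases l <;> simp_all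
    subst this
    simp [PySem.Chars.splitOn.go, splitA]
  | succ n ih =>
    cases l with
    | nil => simp [PySem.Chars.splitOn.go, splitA]
    | cons c t =>
      simp only [PySem.Chars.splitOn.go]
      by_cases hc : c = '/'
      · subst hc
        rw [if_pos (by simp)]
        rw [ih _ _ _ (by simpa using Nat.le_of_succ_le_succ h)]
        simp [splitA]
      · rw [if_neg (by simp [Ne.symm hc])]
        rw [ih _ _ _ (by simpa using Nat.le_of_succ_le_succ h)]
        simp [splitA, hc]

theorem splitOn_eq (cs : List Char) : PySem.Chars.splitOn cs ['/'] = splitA [] cs := by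
  unfold PySem.Chars.splitOn
  rw [splitOn_go_eq (cs.length + 1) cs [] [] (by omega)]
  rfl

theorem splitA_head (pre cs : List Char) :
    (splitA pre cs).head? = some (pre ++ cs.takeWhile (· != '/')) := by
  induction cs generalizing pre with
  | nil => simp [splitA]
  | cons c t ih =>
    by_cases h : c = '/'
    · simp [splitA, h]
    · simp [splitA, h, ih]

-- takeWhile over an append, when the first part contains a failing element
theorem takeWhile_append_of_mem {p : Char → Bool} {xs : List Char} (ys : List Char)
    (h : ∃ x ∈ xs, ¬ p x) : (xs ++ ys).takeWhile p = xs.takeWhile p := by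
  induction xs with
  | nil => simp_all
  | cons a t ih =>
    by_cases ha : p a
    · obtain ⟨x, hx, hpx⟩ := h
      cases hx with
      | head => simp_all
      | tail _ h2 => simp [ha, ih ⟨x, h2, hpx⟩]
    · simp [ha]

-- takeWhile over an append, when the whole first part passes
theorem takeWhile_append_of_all {p : Char → Bool} {xs : List Char} (ys : List Char)
    (h : ∀ x ∈ xs, p x) : (xs ++ ys).takeWhile p = xs ++ ys.takeWhile p := by
  induction xs with
  | nil => simp
  | cons a t ih => simp [h a (by simp), ih (fun x hx => h x (by simp [hx]))]

theorem rsplitLast_cons_of_mem {cs : List Char} (c : Char) (h : '/' ∈ cs) :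
    rsplitLast (c :: cs) = rsplitLast cs := by
  unfold rsplitLast
  rw [List.reverse_cons, takeWhile_append_of_mem _ ⟨'/', by simpa using h, by simp⟩]

theorem rsplitLast_of_not_mem {cs : List Char} (h : '/' ∉ cs) : rsplitLast cs = cs := by
  unfold rsplitLast
  rw [List.takeWhile_eq_self_iff.mpr (by intro x hx; simp; rintro rfl; exact h (by simpa using hx))]
  simp

theorem rsplitLast_cons_of_not_mem {cs : List Char} (c : Char) (h : '/' ∉ cs) :
    rsplitLast (c :: cs) = if c = '/' then cs else c :: cs := by
  unfold rsplitLast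
  rw [List.reverse_cons, takeWhile_append_of_all _
    (by intro x hx; simp; rintro rfl; exact h (by simpa using hx))]
  by_cases hc : c = '/' <;> simp [hc]

theorem getLast?_cons_of_ne_nil {a : List Char} {l : List (List Char)} (h : l ≠ []) :
    (a :: l).getLast? = l.getLast? := by
  cases l with
  | nil => simp_all
  | cons b t => simp [List.getLast?_cons_cons]

theorem splitA_getLast (pre cs : List Char) :
    (splitA pre cs).getLast? = some (if '/' ∈ cs then rsplitLast cs else pre ++ cs) := by
  induction cs generalizing pre with
  | nil => simp [splitA]
  | cons c t ih =>
    by_cases h : c = '/'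
    · subst h
      rw [splitA, if_pos rfl, getLast?_cons_of_ne_nil (splitA_ne_nil _ _), ih]
      by_cases ht : '/' ∈ t
      · simp [ht, rsplitLast_cons_of_mem _ ht]
      · simp [ht, rsplitLast_cons_of_not_mem _ ht]
    · rw [splitA, if_neg h, ih]
      by_cases ht : '/' ∈ t
      · simp [ht, rsplitLast_cons_of_mem _ ht]
      · simp [ht]
        intro hh
        exact absurd hh.symm h

theorem splitA_getLast' (cs : List Char) :
    (splitA [] cs).getLast? = some (rsplitLast cs) := by
  rw [splitA_getLast]
  by_cases h : '/' ∈ cs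
  · simp [h]
  · simp [h, rsplitLast_of_not_mem h]

-- negative / zero indexing of a nonempty list
theorem pyGet?_neg_one {xs : List (List Char)} (h : xs ≠ []) :
    PySem.List.pyGet? xs (-1) = xs.getLast? := by
  have hl : 0 < xs.length := List.length_pos_iff.mpr h
  simp only [PySem.List.pyGet?, PySem.List.pyIdx?]
  rw [if_neg (by omega), if_pos (by exact_mod_cast by omega : (-(xs.length : Int) ≤ -1))]
  simp [List.getLast?_eq_getElem?]

theorem pyGet?_zero {xs : List (List Char)} (h : xs ≠ []) :
    PySem.List.pyGet? xs 0 = xs.head? := by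
  have hl : 0 < xs.length := List.length_pos_iff.mpr h
  simp only [PySem.List.pyGet?, PySem.List.pyIdx?]
  rw [if_pos le_rfl, if_pos (by exact_mod_cast hl)]
  simp [List.head?_eq_getElem?]

-- the per-prefix test of A equals a first-segment comparison
theorem prefix_term (cs d : List Char) (hd : '/' ∉ d) :
    ((cs == d) || PySem.Chars.startswith cs (d ++ ['/'])) = (cs.takeWhile (· != '/') == d) := by
  rcases Bool.eq_false_or_eq_true (cs.takeWhile (· != '/') == d) with h | h
  · rw [h, Bool.or_eq_true_iff]
    rw [beq_iff_eq] at h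
    have hsplit : cs = d ++ cs.dropWhile (· != '/') := by
      conv_lhs => rw [← List.takeWhile_append_dropWhile (p := (· != '/')) (l := cs)]
      rw [h]
    rcases hdw : cs.dropWhile (· != '/') with _ | ⟨c, t⟩
    · left; rw [beq_iff_eq]; rw [hsplit, hdw]; simp
    · right
      have hc : c = '/' := by
        have := List.head_dropWhile_not (p := (· != '/')) (l := cs) (by rw [hdw]; simp)
        simp only [hdw, List.head_cons] at this
        simpa using this
      rw [PySem.Chars.startswith_iff]
      exact ⟨t, by rw [hsplit, hdw, hc]; simp⟩
  · rw [h, Bool.or_eq_false_iff]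
    constructor
    · rw [beq_eq_false_iff_ne] at h ⊢
      rintro rfl
      exact h (List.takeWhile_eq_self_iff.mpr (by intro x hx; simp; rintro rfl; exact hd hx))
    · rw [Bool.eq_false_iff]
      intro hs
      rw [PySem.Chars.startswith_iff] at hs
      obtain ⟨t, ht⟩ := hs
      rw [beq_eq_false_iff_ne] at h
      apply h
      subst ht
      rw [List.append_assoc, List.takeWhile_append]
      rw [List.takeWhile_eq_self_iff.mpr (by intro x hx; simp; rintro rfl; exact hd hx)]
      simp

theorem rstripSlash_append {d : List Char} (hd : '/' ∉ d) :
    rstripSlash (d ++ ['/']) = d := by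
  unfold rstripSlash
  rw [List.reverse_append]
  rw [show (['/'].reverse ++ d.reverse) = '/' :: d.reverse by simp]
  rw [List.dropWhile_cons, if_pos (by decide)]
  cases hdr : d.reverse with
  | nil =>
    have hd0 : d = [] := by simpa using congrArg List.reverse hdr
    simp [hd0]
  | cons a t =>
    have ha : a ≠ '/' := by
      rintro rfl
      exact hd (by rw [← List.reverse_reverse d, hdr]; simp)
    rw [List.dropWhile_cons, if_neg (by simp [ha]), ← hdr, List.reverse_reverse]

-- the stripped directory names, as a plain literal list
def DIR_NAMES : List (List Char) :=
  ["node_modules".toList, ".git".toList, "dist".toList, "build".toList,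
   "__pycache__".toList, ".venv".toList, "vendor".toList, ".github".toList,
   "coverage".toList, "htmlcov".toList, ".next".toList, "target".toList]

theorem prefixes_eq : IGNORE_PATH_PREFIXES = DIR_NAMES.map (· ++ ['/']) := by decide

theorem dirs_eq : IGNORE_DIRS = DIR_NAMES := by decide

theorem dir_names_no_slash : ∀ d ∈ DIR_NAMES, '/' ∉ d := by decide

-- A's prefix loop equals B's first-segment membership test
theorem loops_eq (cs : List Char) :
    IGNORE_PATH_PREFIXES.any (fun p => cs == rstripSlash p || PySem.Chars.startswith cs p)
      = IGNORE_DIRS.contains (cs.takeWhile (· != '/')) := by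
  rw [prefixes_eq, dirs_eq, List.any_map, Bool.eq_iff_iff]
  simp only [List.any_eq_true, List.contains_iff_exists_mem_beq, Function.comp_apply]
  constructor
  · rintro ⟨d, hd, hx⟩
    refine ⟨d, hd, ?_⟩
    have hnd := dir_names_no_slash d hd
    rw [rstripSlash_append hnd, prefix_term cs d hnd] at hx
    exact hx
  · rintro ⟨d, hd, hx⟩
    refine ⟨d, hd, ?_⟩
    have hnd := dir_names_no_slash d hd
    rw [rstripSlash_append hnd, prefix_term cs d hnd]
    exact hx

theorem main_eq (path : String) :
    should_include_tree_path path = should_include_tree_path_alt path := by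
  unfold should_include_tree_path should_include_tree_path_alt
  have hsep : "/".toList = ['/'] := rfl
  rcases hcs : path.toList with _ | ⟨c0, t0⟩
  · rfl
  · simp only [hsep, splitOn_eq]
    rw [pyGet?_neg_one (splitA_ne_nil _ _), pyGet?_zero (splitA_ne_nil _ _),
        splitA_getLast', splitA_head]
    simp only [List.isEmpty_cons, Bool.false_or, List.nil_append, Bool.false_eq_true, if_false]
    by_cases hbase : IGNORE_BASENAMES.contains (rsplitLast (c0 :: t0)) = true
    · -- B rejects on the basename; A rejects on the whole path or on the basename
      by_cases hwhole : IGNORE_BASENAMES.contains (c0 :: t0) = true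
      · rw [if_pos hwhole, if_pos hbase]
      · rw [if_neg hwhole, if_pos hbase, if_pos hbase]
    · -- the whole-path membership is subsumed: each basename literal has no '/'
      have hwhole : ¬ IGNORE_BASENAMES.contains (c0 :: t0) = true := by
        intro hmem
        apply hbase
        have hm : (c0 :: t0) ∈ IGNORE_BASENAMES := by
          simpa [List.contains_iff_exists_mem_beq, eq_comm] using hmem
        have hr : rsplitLast (c0 :: t0) = c0 :: t0 := by
          apply rsplitLast_of_not_mem
          intro hsl
          simp only [IGNORE_BASENAMES, List.mem_cons, List.not_mem_nil, or_false] at hm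
          rcases hm with h | h
          · rw [h] at hsl; revert hsl; decide
          · rw [h] at hsl; revert hsl; decide
        rw [hr]
        exact hmem
      rw [if_neg hwhole, if_neg hbase, if_neg hbase, loops_eq]
      rfl

-- ===== VERDICT (by name: the statement is the Claim_ definition above) =====
theorem should_include_tree_path_spec : Claim_equal_should_include_tree_path := by
  intro path _
  unfold Spec_should_include_tree_path
  exact main_eq path
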